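-- pv_equiv track=rewrite | github.com/WerthPADOH/advent-of-code-2022 | day03.py | sum_trio_badges
-- ===== SOURCE A (Python) =====
-- from functools import reduce
--
-- def total_priority(chars):
--     ordering = 'abcdefghijklmnopqrstuvwxyzABCDEFGHIJKLMNOPQRSTUVWXYZ'
--     return sum(ordering.index(char) + 1 for char in chars)
--
-- def sum_trio_badges(sacks):
--     """
--     >>> rs = [
--     ...     'vJrwpWtwJgWrhcsFMMfFFhFp',
--     ...     'jqHRNqRjqzjGDLGLrsFMfFZSrLrFZsSL',
--     ...     'PmmdzqPrVvPwwTWBwg',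
--     ...     'wMqvLMZHhHMvwLHjbvcjnnSBnvTQFn',
--     ...     'ttgJtRGJQctTZtZT',
--     ...     'CrZsJsPPZsGzwwsLwLmpwMDw',
--     ... ]
--     >>> sum_trio_badges(rs)
--     70
--     """
--     sacks = list(sacks)
--     badges = []
--     while sacks:
--         trio = [set(ss) for ss in sacks[-3:]]
--         del sacks[-3:]
--         common = reduce(lambda x, y: x & y, trio)
--         assert len(common) == 1
--         badges.append(common.pop())
--     return total_priority(badges)
-- ===== SOURCE B (Python) =====
-- def _priority(c):
--     return ord(c) - 96 if c.islower() else ord(c) - 38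
--
--
-- def sum_trio_badges(sacks):
--     total = 0
--     rest = list(sacks)
--     while rest:
--         group = rest[:3]
--         rest = rest[3:]
--         counts = {}
--         for ss in group:
--             for c in set(ss):
--                 counts[c] = counts.get(c, 0) + 1
--         badges = [c for c in counts if counts[c] == len(group)]
--         assert len(badges) == 1
--         total += _priority(badges[0])
--     return total
-- ===== Notes on version B (the rewrite author's own statement) =====
-- stated objective: alternative
-- what changed: Badges are found by a per-group character counter over the sacks' sets (badge = key counted in every sack) instead of reducing set intersections, groups are taken front-to-back in threes instead of deleting slices from the back of a mutable list, and priorities come from ord() arithmetic instead of scanning an ordering string with str.index; Pre_ excludes lists whose length is not a multiple of 3, where A's grouping of a short leftover chunk from the back is an accident of its backward deletion and the two natural groupings legitimately differ.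
-- outside the precondition, e.g. on sum_trio_badges(['a', 'xb', 'yb', 'zb']): A returns 3, B raises AssertionError
import Mathlib
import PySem

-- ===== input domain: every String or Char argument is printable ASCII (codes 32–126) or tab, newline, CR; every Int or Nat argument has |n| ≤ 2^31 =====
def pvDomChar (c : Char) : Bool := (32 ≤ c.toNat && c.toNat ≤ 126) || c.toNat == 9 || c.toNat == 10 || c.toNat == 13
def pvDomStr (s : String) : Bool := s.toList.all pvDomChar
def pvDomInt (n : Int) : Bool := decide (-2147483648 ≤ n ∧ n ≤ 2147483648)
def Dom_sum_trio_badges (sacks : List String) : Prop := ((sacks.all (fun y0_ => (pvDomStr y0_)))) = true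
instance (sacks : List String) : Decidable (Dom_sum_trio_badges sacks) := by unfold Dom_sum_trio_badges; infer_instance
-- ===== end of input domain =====

-- B chunks the list front-to-back in threes, finds each badge with a per-group character counter
-- (key counted once per sack) and uses ord() arithmetic for priorities; equal to A on Pre_.

-- ===== PORT A =====
def pvOrdering : List Char := "abcdefghijklmnopqrstuvwxyzABCDEFGHIJKLMNOPQRSTUVWXYZ".toList

-- ordering.index(char) raises ValueError when char is absent; ported via List.index? with getD 0,
-- exact whenever every char occurs in the ordering (guaranteed by Pre_).
def total_priority (chars : List Char) : Int :=
  chars.foldl (fun acc c => acc + ((((PySem.List.index? pvOrdering c).getD 0 : Nat) : Int) + 1)) 0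

-- the while loop of A: sacks[-3:] is drop (len-3) and del sacks[-3:] leaves take (len-3) (exact for
-- every length, Nat subtraction truncates at 0 like the slice); reduce(&) over the nonempty trio is a
-- foldl over its tail; common.pop() on the asserted singleton is headD (assert raises outside Pre_).
def pvLoopA (sacks : List String) (badges : List Char) : List Char :=
  if _h : sacks = [] then badges
  else
    let trio := (sacks.drop (sacks.length - 3)).map (fun ss => PySem.Set.ofList ss.toList)
    let common := trio.tail.foldl (fun x y => PySem.Set.inter x y) (trio.headD PySem.Set.empty)
    pvLoopA (sacks.take (sacks.length - 3)) (badges ++ [common.headD ' '])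
termination_by sacks.length
decreasing_by
  have : 0 < sacks.length := List.length_pos_iff.mpr _h
  simp [List.length_take]; omega

def sum_trio_badges (sacks : List String) : Int :=
  total_priority (pvLoopA sacks [])

-- ===== PORT B =====
-- _badge part of Source B's loop body: counter over the group's character sets; badge = keys counted in
-- every sack of the group. counts.get(c, 0) is getD; badges[0] after assert len==1 is headD
-- (the assert raises outside Pre_).
def pvBadgeB (g : List String) : Char :=
  let counts := g.foldl (fun d ss =>
    (PySem.Set.ofList ss.toList).foldl (fun d c => d.insert c (d.getD c 0 + 1)) d) PySem.Dict.empty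
  (counts.keys.filter (fun c => counts.getD c 0 = (g.length : Int))).headD ' '

-- _priority
def pvPrioB (c : Char) : Int :=
  if PySem.Chars.islower c then (c.toNat : Int) - 96 else (c.toNat : Int) - 38

-- the while loop of Source B: take the first three sacks, drop them, add the badge's priority
def pvLoopB (rest : List String) (total : Int) : Int :=
  if _h : rest = [] then total
  else pvLoopB (rest.drop 3) (total + pvPrioB (pvBadgeB (rest.take 3)))
termination_by rest.length
decreasing_by
  have : 0 < rest.length := List.length_pos_iff.mpr _h
  simp [List.length_drop]; omega

def sum_trio_badges_alt (sacks : List String) : Int :=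
  pvLoopB sacks 0

-- ===== PRECONDITION & SPEC =====
-- the characters common to all sacks of one group, in first-sack set order
def pvCommon (g : List String) : List Char :=
  match g with
  | [] => []
  | s :: rest =>
      (PySem.Set.ofList s.toList).filter (fun k => rest.all (fun t => (PySem.Set.ofList t.toList).contains k))

-- the i-th trio counted from the END of the list (i = 0 is the last three sacks)
def pvSliceEnd (sacks : List String) (i : Nat) : List String :=
  (sacks.take (sacks.length - 3 * i)).drop (sacks.length - 3 * (i + 1))

-- Pre_ excludes lists whose length is not a multiple of 3 (A's grouping of a short leftover chunk
-- from the back is an accident of its backward deletion; the two natural groupings legitimately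
-- differ there), and the inputs where A raises: a trio without exactly one common character
-- (AssertionError) or whose common character is not a letter (ValueError from ordering.index).
def Pre_sum_trio_badges (sacks : List String) : Prop :=
  sacks.length % 3 = 0 ∧
  ∀ i, i < (sacks.length + 2) / 3 →
    (pvCommon (pvSliceEnd sacks i)).length = 1 ∧
      (pvCommon (pvSliceEnd sacks i)).headD ' ' ∈ pvOrdering
instance (sacks : List String) : Decidable (Pre_sum_trio_badges sacks) := by
  unfold Pre_sum_trio_badges; infer_instance

def pvWitness_sum_trio_badges : List String :=
  ["ab", "cb", "db", "xyz", "zpy", "aoz"]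

def Spec_sum_trio_badges (sacks : List String) (out : Int) : Prop := out = sum_trio_badges_alt sacks
instance (sacks : List String) (out : Int) : Decidable (Spec_sum_trio_badges sacks out) := by
  unfold Spec_sum_trio_badges; infer_instance

-- ===== CLAIM (what is proved, stated in full; the proofs are below) =====
def Claim_equal_sum_trio_badges : Prop := ∀ (sacks : List String), Dom_sum_trio_badges sacks → Pre_sum_trio_badges sacks → Spec_sum_trio_badges sacks (sum_trio_badges sacks)


-- ===== LEMMAS AND PROOFS =====

-- proof-side views of the two per-group computations
def pvBadgeA (g : List String) : Char :=
  let trio := g.map (fun ss => PySem.Set.ofList ss.toList)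
  ((trio.tail.foldl (fun x y => PySem.Set.inter x y) (trio.headD PySem.Set.empty)).headD ' ')

def pvPrioA (c : Char) : Int :=
  (((PySem.List.index? pvOrdering c).getD 0 : Nat) : Int) + 1

-- proof-side front-to-back chunking in threes
def pvChunks3 (l : List String) : List (List String) :=
  if _h : l = [] then [] else l.take 3 :: pvChunks3 (l.drop 3)
termination_by l.length
decreasing_by
  have : 0 < l.length := List.length_pos_iff.mpr _h
  simp [List.length_drop]; omega

lemma pvChunks3_nil : pvChunks3 [] = [] := by simp [pvChunks3]

lemma pvChunks3_cons (l : List String) (h : l ≠ []) :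
    pvChunks3 l = l.take 3 :: pvChunks3 (l.drop 3) := by
  rw [pvChunks3]; simp [h]

lemma pvChunks3_snoc : ∀ (n : Nat) (l : List String), l.length ≤ n → l.length % 3 = 0 → l ≠ [] →
    pvChunks3 l = pvChunks3 (l.take (l.length - 3)) ++ [l.drop (l.length - 3)] := by
  intro n
  induction n with
  | zero => intro l hn _ hne; simp at hn; exact absurd hn hne
  | succ n ih =>
    intro l hn h3 hne
    have hpos : 0 < l.length := List.length_pos_iff.mpr hne
    have h3le : 3 ≤ l.length := by omega
    by_cases hsm : l.length = 3
    · rw [pvChunks3_cons l hne]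
      have hd : l.drop 3 = [] := by
        apply List.eq_nil_of_length_eq_zero; simp [hsm]
      have ht : l.take 3 = l := List.take_of_length_le (by omega)
      simp [hsm, hd, ht, pvChunks3_nil, List.drop_zero]
    · have h6 : 6 ≤ l.length := by omega
      rw [pvChunks3_cons l hne]
      have hdne : l.drop 3 ≠ [] := by
        intro h; have := congrArg List.length h; simp at this; omega
      rw [ih (l.drop 3) (by simp only [List.length_drop]; omega)
        (by simp only [List.length_drop]; omega) hdne]
      have htne : l.take (l.length - 3) ≠ [] := by
        intro h; have := congrArg List.length h; simp at this; omega
      rw [pvChunks3_cons _ htne]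
      have e1 : (l.take (l.length - 3)).take 3 = l.take 3 := by
        rw [List.take_take]; congr 1; omega
      have e2 : (l.take (l.length - 3)).drop 3 = (l.drop 3).take ((l.drop 3).length - 3) := by
        rw [List.drop_take]; simp only [List.length_drop]
      have e3 : l.drop (l.length - 3) = (l.drop 3).drop ((l.drop 3).length - 3) := by
        rw [List.drop_drop]; congr 1; simp; omega
      rw [e1, e2, e3]; simp

lemma pvLoopA_eq : ∀ (n : Nat) (sacks : List String) (badges : List Char),
    sacks.length ≤ n → sacks.length % 3 = 0 →
    pvLoopA sacks badges = badges ++ ((pvChunks3 sacks).map pvBadgeA).reverse := by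
  intro n
  induction n with
  | zero =>
    intro sacks badges hn _
    simp at hn
    simp [hn, pvLoopA, pvChunks3_nil]
  | succ n ih =>
    intro sacks badges hn h3
    by_cases hne : sacks = []
    · simp [hne, pvLoopA, pvChunks3_nil]
    · rw [pvLoopA, dif_neg hne]
      show pvLoopA (sacks.take (sacks.length - 3))
          (badges ++ [pvBadgeA (sacks.drop (sacks.length - 3))]) = _
      have hpos : 0 < sacks.length := List.length_pos_iff.mpr hne
      have h3le : 3 ≤ sacks.length := by omega
      have hlen : (sacks.take (sacks.length - 3)).length = sacks.length - 3 := by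
        simp only [List.length_take]; omega
      rw [ih _ _ (by rw [hlen]; omega) (by rw [hlen]; omega)]
      rw [pvChunks3_snoc sacks.length sacks (le_refl _) h3 hne]
      simp [List.append_assoc]

lemma pvLoopB_eq : ∀ (n : Nat) (l : List String) (total : Int), l.length ≤ n →
    pvLoopB l total = total + ((pvChunks3 l).map (fun g => pvPrioB (pvBadgeB g))).sum := by
  intro n
  induction n with
  | zero =>
    intro l total hn
    simp at hn
    simp [hn, pvLoopB, pvChunks3_nil]
  | succ n ih =>
    intro l total hn
    by_cases hne : l = []
    · simp [hne, pvLoopB, pvChunks3_nil]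
    · rw [pvLoopB, dif_neg hne, ih _ _ (by simp only [List.length_drop]; omega)]
      rw [pvChunks3_cons l hne]
      simp [add_assoc]

lemma total_priority_eq (l : List Char) : total_priority l = (l.map pvPrioA).sum := by
  rw [total_priority, PySem.List.foldl_add, zero_add]
  rfl

lemma A_eq (sacks : List String) (h3 : sacks.length % 3 = 0) :
    sum_trio_badges sacks = ((pvChunks3 sacks).map (fun g => pvPrioA (pvBadgeA g))).sum := by
  rw [sum_trio_badges, pvLoopA_eq sacks.length sacks [] (le_refl _) h3, total_priority_eq]
  rw [List.nil_append, List.map_reverse, List.sum_reverse, List.map_map]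
  rfl

lemma B_eq (sacks : List String) :
    sum_trio_badges_alt sacks = ((pvChunks3 sacks).map (fun g => pvPrioB (pvBadgeB g))).sum := by
  rw [sum_trio_badges_alt, pvLoopB_eq sacks.length sacks 0 (le_refl _), zero_add]

lemma interfold (ts : List (PySem.Set Char)) (a : PySem.Set Char) :
    ts.foldl (fun x y => PySem.Set.inter x y) a
      = a.filter (fun k => ts.all (fun t => t.contains k)) := by
  induction ts generalizing a with
  | nil => simp
  | cons t ts ih =>
      rw [List.foldl_cons, ih]
      simp only [PySem.Set.inter, List.filter_filter, List.all_cons]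
      apply List.filter_congr
      intro k _
      simp [Bool.and_comm]

lemma badgeA_eq (g : List String) (c : Char) (hc : pvCommon g = [c]) : pvBadgeA g = c := by
  match g with
  | [] => simp [pvCommon] at hc
  | s :: rest =>
    rw [pvBadgeA]
    simp only [List.map_cons, List.tail_cons, List.headD_cons]
    rw [interfold]
    have hc' : (PySem.Set.ofList s.toList).filter
        (fun k => rest.all (fun t => (PySem.Set.ofList t.toList).contains k)) = [c] := by
      simpa [pvCommon] using hc
    simp only [List.all_map, Function.comp_def]
    rw [hc']
    rfl

lemma countsB_getD (g : List String) (d : PySem.Dict Char Int) (c : Char) :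
    (g.foldl (fun d ss =>
        (PySem.Set.ofList ss.toList).foldl (fun d c => d.insert c (d.getD c 0 + 1)) d) d).getD c 0
      = d.getD c 0 + (g.countP (fun s => (PySem.Set.ofList s.toList).contains c) : Int) := by
  induction g generalizing d with
  | nil => simp
  | cons s g ih =>
    rw [List.foldl_cons, ih, PySem.Dict.getD_foldl_insert_add_one, List.countP_cons]
    have hcnt : List.count c (PySem.Set.ofList s.toList)
        = if (PySem.Set.ofList s.toList).contains c = true then 1 else 0 := by
      by_cases h : c ∈ PySem.Set.ofList s.toList
      · simp [h]
      · simp [List.count_eq_zero_of_not_mem h, h]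
    rw [hcnt]
    push_cast
    split_ifs <;> ring

lemma countsB_keys (g : List String) (d : PySem.Dict Char Int) :
    (g.foldl (fun d ss =>
        (PySem.Set.ofList ss.toList).foldl (fun d c => d.insert c (d.getD c 0 + 1)) d) d).keys
      = PySem.Set.update d.keys (g.flatMap (fun s => PySem.Set.ofList s.toList)) := by
  induction g generalizing d with
  | nil => simp [PySem.Set.update]
  | cons s g ih =>
    rw [List.foldl_cons, ih, PySem.Dict.keys_foldl_insert, List.flatMap_cons]
    simp [PySem.Set.update, List.foldl_append]

lemma filter_eq_singleton {α : Type} (l : List α) (p : α → Bool) (x : α)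
    (hnd : l.Nodup) (hx : x ∈ l) (hp : ∀ k ∈ l, p k = true ↔ k = x) :
    l.filter p = [x] := by
  induction l with
  | nil => simp at hx
  | cons a l ih =>
    obtain ⟨hax, hnd'⟩ := List.nodup_cons.mp hnd
    rcases List.mem_cons.mp hx with rfl | hxl
    · rw [List.filter_cons_of_pos ((hp x (by simp)).mpr rfl)]
      have hnil : l.filter p = [] := by
        rw [List.filter_eq_nil_iff]
        intro k hk hpk
        exact hax (((hp k (by simp [hk])).mp hpk) ▸ hk)
      rw [hnil]
    · have hax' : a ≠ x := by rintro rfl; exact hax hxl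
      rw [List.filter_cons_of_neg (by simp [hp a (by simp), hax'])]
      exact ih hnd' hxl (fun k hk => hp k (by simp [hk]))

lemma badgeB_eq (g : List String) (c : Char) (hc : pvCommon g = [c]) : pvBadgeB g = c := by
  match g with
  | [] => simp [pvCommon] at hc
  | s :: rest =>
    have hc' : (PySem.Set.ofList s.toList).filter
        (fun k => rest.all (fun t => (PySem.Set.ofList t.toList).contains k)) = [c] := by
      simpa [pvCommon] using hc
    have hcmemS : c ∈ PySem.Set.ofList s.toList ∧
        rest.all (fun t => (PySem.Set.ofList t.toList).contains c) = true := by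
      have : c ∈ (PySem.Set.ofList s.toList).filter
          (fun k => rest.all (fun t => (PySem.Set.ofList t.toList).contains k)) := by
        rw [hc']; simp
      simpa using (List.mem_filter.mp this)
    have hall : ∀ k : Char, (∀ t ∈ (s :: rest), (PySem.Set.ofList t.toList).contains k = true) ↔ k = c := by
      intro k
      constructor
      · intro h
        have hks : k ∈ PySem.Set.ofList s.toList :=
          List.contains_iff_mem.mp (h s (by simp))
        have hkr : rest.all (fun t => (PySem.Set.ofList t.toList).contains k) = true :=
          List.all_eq_true.mpr (fun t ht => h t (by simp [ht]))
        have : k ∈ [c] := by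
          rw [← hc']
          exact List.mem_filter.mpr ⟨hks, hkr⟩
        simpa using this
      · rintro rfl
        intro t ht
        rcases List.mem_cons.mp ht with rfl | htr
        · exact List.contains_iff_mem.mpr hcmemS.1
        · exact List.all_eq_true.mp hcmemS.2 t htr
    simp only [pvBadgeB]
    rw [countsB_keys]
    have hkeys : PySem.Set.update (PySem.Dict.empty : PySem.Dict Char Int).keys
        ((s :: rest).flatMap (fun t => PySem.Set.ofList t.toList))
        = PySem.Set.ofList ((s :: rest).flatMap (fun t => PySem.Set.ofList t.toList)) := by
      rw [PySem.Dict.keys_empty]; rfl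
    rw [hkeys]
    rw [filter_eq_singleton _ _ c (PySem.Set.nodup_ofList _)
      (by
        rw [PySem.Set.mem_ofList, List.mem_flatMap]
        exact ⟨s, by simp, hcmemS.1⟩)
      (by
        intro k _
        simp only [decide_eq_true_eq]
        rw [countsB_getD]
        simp only [PySem.Dict.getD_empty, zero_add]
        rw [Nat.cast_inj, List.countP_eq_length]
        exact hall k)]
    simp

lemma pvChunks3_mem_slice : ∀ (n : Nat) (sacks : List String),
    sacks.length ≤ n → sacks.length % 3 = 0 →
    ∀ g ∈ pvChunks3 sacks, ∃ i, i < (sacks.length + 2) / 3 ∧ g = pvSliceEnd sacks i := by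
  intro n
  induction n with
  | zero =>
    intro sacks hn _ g hg
    simp at hn
    rw [hn, pvChunks3_nil] at hg
    simp at hg
  | succ n ih =>
    intro sacks hn h3 g hg
    have hne : sacks ≠ [] := by
      rintro rfl; rw [pvChunks3_nil] at hg; simp at hg
    have hpos : 0 < sacks.length := List.length_pos_iff.mpr hne
    have h3le : 3 ≤ sacks.length := by omega
    rw [pvChunks3_snoc sacks.length sacks (le_refl _) h3 hne] at hg
    rcases List.mem_append.mp hg with hg' | hg'
    · have hlen : (sacks.take (sacks.length - 3)).length = sacks.length - 3 := by
        simp only [List.length_take]; omega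
      obtain ⟨i, hi, rfl⟩ := ih (sacks.take (sacks.length - 3)) (by rw [hlen]; omega)
        (by rw [hlen]; omega) g hg'
      have hi' : i < (sacks.length - 3 + 2) / 3 := by rw [hlen] at hi; exact hi
      refine ⟨i + 1, by omega, ?_⟩
      rw [pvSliceEnd, pvSliceEnd, hlen, List.take_take]
      have e1 : min (sacks.length - 3 - 3 * i) (sacks.length - 3)
          = sacks.length - 3 * (i + 1) := by omega
      have e2 : sacks.length - 3 - 3 * (i + 1) = sacks.length - 3 * (i + 1 + 1) := by omega
      rw [e1, e2]
    · refine ⟨0, by omega, ?_⟩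
      simp at hg'
      rw [hg', pvSliceEnd]
      simp

lemma prio_bool : pvOrdering.all (fun c => pvPrioA c == pvPrioB c) = true := by rfl

lemma prio_eq (c : Char) (hc : c ∈ pvOrdering) : pvPrioA c = pvPrioB c :=
  eq_of_beq (List.all_eq_true.mp prio_bool c hc)

-- ===== VERDICT (by name: the statement is the Claim_ definition above) =====
theorem sum_trio_badges_spec : Claim_equal_sum_trio_badges := by
  intro sacks _ hpre
  obtain ⟨h3, hpre⟩ := hpre
  unfold Spec_sum_trio_badges
  rw [A_eq sacks h3, B_eq]
  congr 1
  apply List.map_congr_left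
  intro g hg
  obtain ⟨i, hi, rfl⟩ := pvChunks3_mem_slice sacks.length sacks (le_refl _) h3 g hg
  obtain ⟨hlen, hord⟩ := hpre i hi
  obtain ⟨c, hc⟩ := List.length_eq_one_iff.mp hlen
  rw [hc] at hord
  rw [badgeA_eq _ c hc, badgeB_eq _ c hc, prio_eq c (by simpa using hord)]
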